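-- pv_equiv track=rewrite | github.com/BenjiDayan/spanningtrees | benji_transformer_play.py | group_indices_by_num
-- ===== SOURCE A (Python) =====
-- def group_indices_by_num(int_list):
--     """[0, 0, 1, 2, 3, 4, 4, 5] -> [(0,1), (2,), (3,), (4,), (5,6), (7,)]"""
--     grouped = []
--     for i, num in enumerate(int_list):
--         if len(grouped) < num+1:
--             grouped.append((i,))
--         else:
--             grouped[-1] += (i,)
--     return grouped
-- ===== SOURCE B (Python) =====
-- def group_indices_by_num(int_list):
--     """[0, 0, 1, 2, 3, 4, 4, 5] -> [(0,1), (2,), (3,), (4,), (5,6), (7,)]"""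
--     # Pass 1: assign each position a group id; count = number of groups so far.
--     count = 0
--     ids = []
--     for num in int_list:
--         if num >= count:
--             count += 1
--         ids.append(count - 1)
--     # Pass 2: collect, per group id, the positions carrying it.
--     return [tuple(i for i, g in enumerate(ids) if g == gid) for gid in range(count)]
-- ===== Notes on version B (the rewrite author's own statement) =====
-- stated objective: alternative
-- what changed: Replaces A's single append-or-extend-last fold over enumerate with two differently-shaped passes: a first pass assigning each position a group id via a running group count, then a per-group-id collection pass over the enumerated id table.
import Mathlib
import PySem

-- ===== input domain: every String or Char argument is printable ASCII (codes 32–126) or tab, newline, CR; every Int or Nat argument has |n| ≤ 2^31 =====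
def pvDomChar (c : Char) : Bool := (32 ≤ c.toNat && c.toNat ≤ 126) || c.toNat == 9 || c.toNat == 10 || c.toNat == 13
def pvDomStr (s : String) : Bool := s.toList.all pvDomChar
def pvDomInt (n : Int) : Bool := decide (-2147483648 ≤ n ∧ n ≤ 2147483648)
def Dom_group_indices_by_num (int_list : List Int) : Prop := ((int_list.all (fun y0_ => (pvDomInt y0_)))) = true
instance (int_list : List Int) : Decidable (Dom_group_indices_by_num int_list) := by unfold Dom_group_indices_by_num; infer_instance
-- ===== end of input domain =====

-- B replaces A's append-or-extend fold by an id-table pass plus a per-group collection pass (alternative decomposition).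


-- ===== PORT A =====
-- one step of A's loop body; grouped[-1] += (i,) on an empty grouped is Python's IndexError (excluded by Pre_)
def agStep (grouped : List (List Int)) (p : Int × Int) : List (List Int) :=
  if (grouped.length : Int) < p.2 + 1 then grouped ++ [[p.1]]
  else match grouped.getLast? with
       | some last => grouped.dropLast ++ [last ++ [p.1]]
       | none => []

def group_indices_by_num (int_list : List Int) : List (List Int) :=
  (PySem.List.enumerate int_list).foldl agStep []

-- ===== PORT B =====
-- pass 1 step: bump the group count when num starts a new group, record the group id
def bIdStep (p : List Int × Int) (num : Int) : List Int × Int :=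
  let c := if p.2 ≤ num then p.2 + 1 else p.2
  (p.1 ++ [c - 1], c)

-- pass 2: the positions carrying group id gid
def bRow (ids : List Int) (gid : Int) : List Int :=
  (PySem.List.enumerate ids).filterMap (fun q => if q.2 = gid then some q.1 else none)

def group_indices_by_num_alt (int_list : List Int) : List (List Int) :=
  let p := int_list.foldl bIdStep ([], 0)
  (PySem.List.pyRange 0 p.2 1).map (fun gid => bRow p.1 gid)

-- ===== PRECONDITION & SPEC =====
-- Pre_ excludes exactly the inputs where A raises IndexError: a nonempty list whose first element is negative.
def Pre_group_indices_by_num (int_list : List Int) : Prop :=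
  ∀ x ∈ int_list.take 1, 0 ≤ x
instance (int_list : List Int) : Decidable (Pre_group_indices_by_num int_list) := by
  unfold Pre_group_indices_by_num; infer_instance

def pvWitness_group_indices_by_num : List Int := [0, 0, 1, 2, 3, 4, 4, 5]

def Spec_group_indices_by_num (int_list : List Int) (out : List (List Int)) : Prop := out = group_indices_by_num_alt int_list
instance (int_list : List Int) (out : List (List Int)) : Decidable (Spec_group_indices_by_num int_list out) := by unfold Spec_group_indices_by_num; infer_instance

-- ===== CLAIM (what is proved, stated in full; the proofs are below) =====
def Claim_equal_group_indices_by_num : Prop := ∀ (int_list : List Int), Dom_group_indices_by_num int_list → Pre_group_indices_by_num int_list → Spec_group_indices_by_num int_list (group_indices_by_num int_list)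

-- ===== LEMMAS AND PROOFS =====

-- B's table of groups for a given id list and group count
def bTable (ids : List Int) (count : Int) : List (List Int) :=
  (PySem.List.pyRange 0 count 1).map (fun gid => bRow ids gid)

lemma enumerate_append_singleton (xs : List Int) (x : Int) (s : Int) :
    PySem.List.enumerate (xs ++ [x]) s = PySem.List.enumerate xs s ++ [((s + xs.length : Int), x)] := by
  induction xs generalizing s with
  | nil => simp [PySem.List.enumerate_cons, PySem.List.enumerate_nil]
  | cons y ys ih =>
      simp [PySem.List.enumerate_cons, ih (s+1)]
      ring_nf

lemma bRow_append (ids : List Int) (x gid : Int) :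
    bRow (ids ++ [x]) gid = bRow ids gid ++ (if x = gid then [(ids.length : Int)] else []) := by
  unfold bRow
  rw [enumerate_append_singleton, List.filterMap_append]
  by_cases h : x = gid <;> simp [h]

lemma bRow_eq_nil (ids : List Int) (gid : Int) (h : gid ∉ ids) : bRow ids gid = [] := by
  induction ids using List.reverseRecOn with
  | nil => simp [bRow, PySem.List.enumerate_nil]
  | append_singleton ys y ih =>
      rw [bRow_append]
      have hy : y ≠ gid := by intro e; exact h (by simp [e])
      simp [hy, ih (fun hm => h (by simp [hm]))]

lemma length_bTable (ids : List Int) (count : Int) : (bTable ids count).length = count.toNat := by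
  simp [bTable, PySem.List.length_pyRange_one]

lemma bTable_new (ids : List Int) (count : Int) (h0 : 0 ≤ count)
    (hlt : ∀ g ∈ ids, g < count) :
    bTable (ids ++ [count]) (count + 1) = bTable ids count ++ [[(ids.length : Int)]] := by
  unfold bTable
  rw [PySem.List.pyRange_one_succ_right h0, List.map_append]
  congr 1
  · apply List.map_congr_left
    intro gid hg
    have : gid < count := ((PySem.List.mem_pyRange_one).1 hg).2
    rw [bRow_append]
    simp [show ¬ count = gid by omega]
  · simp [bRow_append, bRow_eq_nil ids count (fun hm => absurd (hlt _ hm) (by omega))]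

lemma bTable_extend (ids : List Int) (count : Int) (h1 : 1 ≤ count) :
    bTable (ids ++ [count - 1]) count
      = (bTable ids count).dropLast ++ [bRow ids (count - 1) ++ [(ids.length : Int)]] := by
  have hsplit : PySem.List.pyRange 0 count 1 = PySem.List.pyRange 0 (count - 1) 1 ++ [count - 1] := by
    have := PySem.List.pyRange_one_succ_right (a := 0) (b := count - 1) (by omega)
    simpa [show count - 1 + 1 = count by ring] using this
  unfold bTable
  rw [hsplit]
  simp only [List.map_append, List.map_cons, List.map_nil, List.dropLast_concat]
  congr 1
  · apply List.map_congr_left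
    intro gid hg
    have : gid < count - 1 := ((PySem.List.mem_pyRange_one).1 hg).2
    rw [bRow_append]
    simp [show ¬ count - 1 = gid by omega]
  · simp [bRow_append]

lemma bTable_getLast? (ids : List Int) (count : Int) (h1 : 1 ≤ count) :
    (bTable ids count).getLast? = some (bRow ids (count - 1)) := by
  have hsplit : PySem.List.pyRange 0 count 1 = PySem.List.pyRange 0 (count - 1) 1 ++ [count - 1] := by
    have := PySem.List.pyRange_one_succ_right (a := 0) (b := count - 1) (by omega)
    simpa [show count - 1 + 1 = count by ring] using this
  unfold bTable
  rw [hsplit, List.map_append]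
  simp

lemma main_invariant (l : List Int) : ∀ (ids : List Int) (count : Int),
    1 ≤ count → (∀ g ∈ ids, g < count) →
    (PySem.List.enumerate l (ids.length : Int)).foldl agStep (bTable ids count)
      = bTable (l.foldl bIdStep (ids, count)).1 (l.foldl bIdStep (ids, count)).2 := by
  induction l with
  | nil => intro ids count _ _; simp [PySem.List.enumerate_nil]
  | cons num l' ih =>
      intro ids count h1 hlt
      rw [PySem.List.enumerate_cons, List.foldl_cons, List.foldl_cons]
      have hlen : ((bTable ids count).length : Int) = count := by
        rw [length_bTable]; omega
      by_cases hc : count ≤ num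
      · have hcond : ((bTable ids count).length : Int) < num + 1 := by omega
        have hstep : agStep (bTable ids count) ((ids.length : Int), num)
            = bTable (ids ++ [count]) (count + 1) := by
          rw [agStep, if_pos hcond, bTable_new ids count (by omega) hlt]
        have hB : bIdStep (ids, count) num = (ids ++ [count], count + 1) := by
          simp [bIdStep, hc]
        rw [hstep, hB]
        have := ih (ids ++ [count]) (count + 1) (by omega)
          (by intro g hg; rcases List.mem_append.1 hg with h | h
              · exact lt_trans (hlt g h) (by omega)
              · simp at h; omega)
        simpa using this
      · have hcond : ¬ ((bTable ids count).length : Int) < num + 1 := by omega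
        have hstep : agStep (bTable ids count) ((ids.length : Int), num)
            = bTable (ids ++ [count - 1]) count := by
          rw [agStep, if_neg hcond, bTable_getLast? ids count h1,
            bTable_extend ids count h1]
        have hB : bIdStep (ids, count) num = (ids ++ [count - 1], count) := by
          simp [bIdStep, hc]
        rw [hstep, hB]
        have := ih (ids ++ [count - 1]) count h1
          (by intro g hg; rcases List.mem_append.1 hg with h | h
              · exact hlt g h
              · simp at h; omega)
        simpa using this

-- ===== VERDICT (by name: the statement is the Claim_ definition above) =====
theorem group_indices_by_num_spec : Claim_equal_group_indices_by_num := by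
  intro int_list _ hpre
  unfold Spec_group_indices_by_num group_indices_by_num group_indices_by_num_alt
  cases int_list with
  | nil => simp [PySem.List.enumerate_nil, PySem.List.pyRange_one_eq_nil]
  | cons num rest =>
      have h0 : 0 ≤ num := hpre num (by simp)
      rw [PySem.List.enumerate_cons, List.foldl_cons, List.foldl_cons]
      have hfirstA : agStep [] ((0 : Int), num) = bTable [0] 1 := by
        rw [agStep, if_pos (by simpa using (by omega : (0:Int) < num + 1))]
        simp [bTable, PySem.List.pyRange_one, bRow, PySem.List.enumerate_cons,
          PySem.List.enumerate_nil]
      have hfirstB : bIdStep ([], 0) num = ([0], 1) := by simp [bIdStep, h0]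
      rw [hfirstA, hfirstB]
      have := main_invariant rest [0] 1 (by omega) (by simp)
      simpa using this
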